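-- pv_equiv track=rewrite | github.com/hyeyoon100/RePool | generate_labels.py | generate_token_labels
-- ===== SOURCE A (Python) =====
-- def generate_token_labels(sentences, ner_spans):
--     """
--     Args:
--         sentences: List[List[str]] - 문장별 토큰 리스트
--         ner_spans: List[List[Tuple[int, int, str]]] - 문장별 NER span 정보
--     Returns:
--         labels: List[int] - 전체 토큰에 대한 binary label (1: entity token, 0: non-entity token)
--         total_len: int - 전체 토큰 수
--     """
--     # 토큰 flatten
--     flat_tokens = [tok for sent in sentences for tok in sent]
--     total_len = len(flat_tokens)
--
--     # 각 문장 길이 누적합 계산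
--     sent_lens = [len(s) for s in sentences]
--     offsets = [0]
--     for l in sent_lens[:-1]:
--         offsets.append(offsets[-1] + l)
--
--     # 0으로 초기화
--     label = [0] * total_len
--
--     # span labeling
--     for sent_idx, span_list in enumerate(ner_spans):
--         offset = offsets[sent_idx]  # 현재 문장의 시작 오프셋
--
--         for start, end, _ in span_list:
--             # 현재 문장 내에서의 start, end를 전체 문서에서의 인덱스로 변환
--             global_start = offset + start
--             global_end = offset + end
--
--             # 범위 체크 후 라벨링
--             if global_start < total_len:
--                 for i in range(global_start, min(global_end + 1, total_len)):
--                     label[i] = 1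
--
--     return label, total_len
-- ===== SOURCE B (Python) =====
-- def generate_token_labels(sentences, ner_spans):
--     total_len = sum(len(s) for s in sentences)
--     # difference array: +1 at span start, -1 past span end; one prefix scan
--     diff = [0] * (total_len + 1)
--     offset = 0
--     for sent, span_list in zip(sentences, ner_spans):
--         for start, end, _ in span_list:
--             gs = offset + start
--             ge = min(offset + end + 1, total_len)
--             if gs < ge:
--                 diff[gs] += 1
--                 diff[ge] -= 1
--         offset += len(sent)
--     label = []
--     cover = 0
--     for i in range(total_len):
--         cover += diff[i]
--         label.append(1 if cover > 0 else 0)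
--     return label, total_len
-- ===== Notes on version B (the rewrite author's own statement) =====
-- stated objective: alternative
-- what changed: Instead of writing 1 into every labelled position of every span, B records +1/-1 at each span's global start/end in a difference array while walking sentences and spans once with a running offset, then materialises the binary labels in a single prefix-sum scan.
-- outside the precondition, e.g. on generate_token_labels([['a', 'b', 'c']], [[(-1, 0, 'E')]]): A returns ([1, 0, 1], 3), B returns ([0, 0, 0], 3)
import Mathlib
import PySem

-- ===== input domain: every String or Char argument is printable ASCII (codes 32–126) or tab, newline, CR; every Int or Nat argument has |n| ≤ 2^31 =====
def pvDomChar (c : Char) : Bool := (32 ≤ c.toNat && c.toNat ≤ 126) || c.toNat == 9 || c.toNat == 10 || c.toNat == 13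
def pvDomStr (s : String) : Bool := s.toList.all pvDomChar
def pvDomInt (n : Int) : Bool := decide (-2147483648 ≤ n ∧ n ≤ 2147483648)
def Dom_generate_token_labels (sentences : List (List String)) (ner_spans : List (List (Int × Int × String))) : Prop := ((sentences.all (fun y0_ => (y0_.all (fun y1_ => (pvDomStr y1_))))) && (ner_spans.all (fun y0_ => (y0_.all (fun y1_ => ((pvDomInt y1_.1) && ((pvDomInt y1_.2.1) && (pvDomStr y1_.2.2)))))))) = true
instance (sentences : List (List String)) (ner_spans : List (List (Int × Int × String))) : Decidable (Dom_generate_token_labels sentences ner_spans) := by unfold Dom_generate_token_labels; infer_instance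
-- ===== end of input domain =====

-- B replaces per-position span painting by a +1/-1 difference array and one prefix-sum
-- scan; equivalence is proved on span lists that fit the offsets table and whose writing
-- spans have non-negative global starts.

-- ===== PORT A =====
def generate_token_labels (sentences : List (List String)) (ner_spans : List (List (Int × Int × String))) : List Int × Int :=
  -- flat_tokens = [tok for sent in sentences for tok in sent]
  let flat_tokens := sentences.foldl (fun acc sent => acc ++ sent) ([] : List String)
  let total_len : Int := flat_tokens.length
  let sent_lens : List Int := sentences.map (fun s => (s.length : Int))
  -- sent_lens[:-1] is dropLast; offsets[-1] is pyGetD … (-1)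
  let offsets : List Int :=
    sent_lens.dropLast.foldl (fun acc l => acc ++ [PySem.List.pyGetD acc (-1) 0 + l]) [(0 : Int)]
  let label0 : List Int := List.replicate total_len.toNat 0
  let label :=
    (PySem.List.enumerate ner_spans 0).foldl (fun lab p =>
      let offset := PySem.List.pyGetD offsets p.1 0   -- offsets[sent_idx]; Pre_ keeps the index in range
      p.2.foldl (fun lab sp =>
        let global_start := offset + sp.1
        let global_end := offset + sp.2.1
        if global_start < total_len then
          (PySem.List.pyRange global_start (min (global_end + 1) total_len) 1).foldl
            (fun lab i => PySem.List.pySetD lab i 1) lab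
        else lab) lab) label0
  (label, total_len)

-- ===== PORT B =====
-- diff[i] += v  (Pre_ keeps the touched indices non-negative and in range)
def pvBump (d : List Int) (i : Int) (v : Int) : List Int :=
  PySem.List.pySetD d i (PySem.List.pyGetD d i 0 + v)

def generate_token_labels_alt (sentences : List (List String)) (ner_spans : List (List (Int × Int × String))) : List Int × Int :=
  let total_len : Int := (sentences.map (fun s => (s.length : Int))).sum
  let diff0 : List Int := List.replicate (total_len.toNat + 1) 0
  let st :=
    (sentences.zip ner_spans).foldl (fun (st : List Int × Int) pr =>
      let d :=
        pr.2.foldl (fun d sp =>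
          let gs := st.2 + sp.1
          let ge := min (st.2 + sp.2.1 + 1) total_len
          if gs < ge then pvBump (pvBump d gs 1) ge (-1) else d) st.1
      (d, st.2 + (pr.1.length : Int))) (diff0, (0 : Int))
  let diff := st.1
  let sc :=
    (PySem.List.pyRange 0 total_len 1).foldl (fun (st : List Int × Int) i =>
      let cover := st.2 + PySem.List.pyGetD diff i 0
      (st.1 ++ [if 0 < cover then (1 : Int) else 0], cover)) ((([] : List Int)), (0 : Int))
  (sc.1, total_len)

-- ===== PRECONDITION & SPEC =====
-- offset of sentence j = number of tokens before it
def pvOff (S : List (List String)) (j : Nat) : Int := ((S.take j).map (fun s => (s.length : Int))).sum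

-- Pre_ excludes span lists longer than the offsets table (there A raises IndexError on
-- offsets[sent_idx]) and spans whose global start is negative while the span actually
-- labels something: malformed input on which A's writes wrap around the label list via
-- Python negative indexing (or raise IndexError).
def Pre_generate_token_labels (sentences : List (List String)) (ner_spans : List (List (Int × Int × String))) : Prop :=
  ner_spans.length ≤ max 1 sentences.length ∧
    ∀ i : Nat, ∀ _h : i < ner_spans.length, ∀ sp ∈ ner_spans[i],
      0 ≤ pvOff sentences i + sp.1 ∨
        min (pvOff sentences i + sp.2.1 + 1) ((sentences.map (fun s => (s.length : Int))).sum)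
          ≤ pvOff sentences i + sp.1
instance (sentences : List (List String)) (ner_spans : List (List (Int × Int × String))) : Decidable (Pre_generate_token_labels sentences ner_spans) := by unfold Pre_generate_token_labels; infer_instance

def pvWitness_generate_token_labels : List (List String) × (List (List (Int × Int × String))) :=
  ([["a", "b"], ["c"]], [[(0, 0, "PER")], [(0, 5, "LOC")]])

def Spec_generate_token_labels (sentences : List (List String)) (ner_spans : List (List (Int × Int × String))) (out : List Int × Int) : Prop := out = generate_token_labels_alt sentences ner_spans
instance (sentences : List (List String)) (ner_spans : List (List (Int × Int × String))) (out : List Int × Int) : Decidable (Spec_generate_token_labels sentences ner_spans out) := by unfold Spec_generate_token_labels; infer_instance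

-- ===== CLAIM (what is proved, stated in full; the proofs are below) =====
def Claim_equal_generate_token_labels : Prop := ∀ (sentences : List (List String)) (ner_spans : List (List (Int × Int × String))), Dom_generate_token_labels sentences ner_spans → Pre_generate_token_labels sentences ner_spans → Spec_generate_token_labels sentences ner_spans (generate_token_labels sentences ner_spans)

-- ===== LEMMAS AND PROOFS =====

-- the global (start, one-past-end clamped to T) pairs of all spans, sentence by sentence
def pvFlatQ (off : Nat → Int) (T : Int) : List (List (Int × Int × String)) → Nat → List (Int × Int)
  | [], _ => []
  | n :: N, j => n.map (fun sp => (off j + sp.1, min (off j + sp.2.1 + 1) T)) ++ pvFlatQ off T N (j + 1)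

def pvMark (lab : List Int) (q : Int × Int) : List Int :=
  (PySem.List.pyRange q.1 q.2 1).foldl (fun lab i => PySem.List.pySetD lab i 1) lab

def pvBumpStep (d : List Int) (q : Int × Int) : List Int :=
  if q.1 < q.2 then pvBump (pvBump d q.1 1) q.2 (-1) else d

lemma length_foldl_pySetD (L : List Int) : ∀ (lab : List Int),
    (L.foldl (fun lab i => PySem.List.pySetD lab i 1) lab).length = lab.length := by
  induction L with
  | nil => intro lab; rfl
  | cons x L ih => intro lab; simp [List.foldl_cons, ih, PySem.List.length_pySetD]

lemma length_pvMark (lab : List Int) (q : Int × Int) : (pvMark lab q).length = lab.length := by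
  simp [pvMark, length_foldl_pySetD]

lemma pvMark_getElem_aux (n : Nat) : ∀ (lab : List Int) (a b : Int), (b - a).toNat ≤ n →
    (a < b → 0 ≤ a) → b ≤ (lab.length : Int) → ∀ k : Nat,
    (pvMark lab (a, b))[k]? = if a ≤ (k : Int) ∧ (k : Int) < b then some 1 else lab[k]? := by
  induction n with
  | zero =>
    intro lab a b hn ha hb k
    rw [pvMark]
    simp only [PySem.List.pyRange_one_eq_nil (by omega : b ≤ a), List.foldl_nil]
    rw [if_neg (by omega)]
  | succ n ih =>
    intro lab a b hn ha hb k
    by_cases hab : a < b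
    · have ha0 : (0 : Int) ≤ a := ha hab
      have hn' : (b - (a + 1)).toNat ≤ n := by omega
      have ha' : a + 1 < b → (0 : Int) ≤ a + 1 := fun _ => by omega
      have hb' : b ≤ ((PySem.List.pySetD lab a 1).length : Int) := by
        rw [PySem.List.length_pySetD]; exact hb
      have h1 := ih (PySem.List.pySetD lab a 1) (a + 1) b hn' ha' hb' k
      rw [pvMark] at h1 ⊢
      rw [PySem.List.pyRange_one_cons hab]
      simp only [List.foldl_cons]
      rw [h1, PySem.List.pySetD_of_nonneg lab 1 ha0, List.getElem?_set]
      by_cases hk : a.toNat = k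
      · have hkl : k < lab.length := by omega
        simp only [hk, if_pos hkl]
        split_ifs <;> first | rfl | omega
      · rw [if_neg hk]
        by_cases hc : a + 1 ≤ (k : Int) ∧ (k : Int) < b
        · rw [if_pos hc, if_pos (by omega)]
        · rw [if_neg hc, if_neg (by omega)]
    · rw [pvMark]
      simp only [PySem.List.pyRange_one_eq_nil (by omega : b ≤ a), List.foldl_nil]
      rw [if_neg (by omega)]

lemma pvMark_getElem (lab : List Int) (a b : Int) (ha : a < b → 0 ≤ a) (hb : b ≤ (lab.length : Int)) (k : Nat) :
    (pvMark lab (a, b))[k]? = if a ≤ (k : Int) ∧ (k : Int) < b then some 1 else lab[k]? :=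
  pvMark_getElem_aux (b - a).toNat lab a b le_rfl ha hb k

lemma foldl_pvMark_getElem (Q : List (Int × Int)) : ∀ (lab : List Int),
    (∀ q ∈ Q, (q.1 < q.2 → 0 ≤ q.1) ∧ q.2 ≤ (lab.length : Int)) → ∀ k : Nat,
    (Q.foldl pvMark lab)[k]? =
      if ∃ q ∈ Q, q.1 ≤ (k : Int) ∧ (k : Int) < q.2 then some 1 else lab[k]? := by
  induction Q with
  | nil => intro lab _ k; simp
  | cons q Q ih =>
    intro lab hq k
    simp only [List.foldl_cons]
    rw [ih (pvMark lab q) (by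
      intro p hp
      rw [length_pvMark]
      exact hq p (List.mem_cons_of_mem _ hp)) k]
    have hq0 := hq q (List.mem_cons_self ..)
    rw [show pvMark lab q = pvMark lab (q.1, q.2) from rfl,
       pvMark_getElem lab q.1 q.2 hq0.1 hq0.2 k]
    by_cases h1 : ∃ p ∈ Q, p.1 ≤ (k : Int) ∧ (k : Int) < p.2
    · rw [if_pos h1, if_pos (by
        rcases h1 with ⟨p, hp, h⟩
        exact ⟨p, List.mem_cons_of_mem _ hp, h⟩)]
    · rw [if_neg h1]
      by_cases h2 : q.1 ≤ (k : Int) ∧ (k : Int) < q.2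
      · rw [if_pos h2, if_pos ⟨q, List.mem_cons_self .., h2⟩]
      · rw [if_neg h2, if_neg (by
          rintro ⟨p, hp, h⟩
          rcases List.mem_cons.mp hp with rfl | hp'
          exacts [h2 h, h1 ⟨p, hp', h⟩])]

lemma length_pvBump (d : List Int) (i v : Int) : (pvBump d i v).length = d.length := by
  simp [pvBump, PySem.List.length_pySetD]

lemma length_pvBumpStep (d : List Int) (q : Int × Int) : (pvBumpStep d q).length = d.length := by
  unfold pvBumpStep; split_ifs <;> simp [length_pvBump]

lemma length_foldl_pvBumpStep (Q : List (Int × Int)) : ∀ (d : List Int),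
    (Q.foldl pvBumpStep d).length = d.length := by
  induction Q with
  | nil => intro d; rfl
  | cons q Q ih => intro d; simp [List.foldl_cons, ih, length_pvBumpStep]

lemma sum_take_set_int (d : List Int) (n : Nat) (a : Int) (hn : n < d.length) (m : Nat) :
    ((d.set n a).take m).sum = (d.take m).sum + (if n < m then a - d[n] else 0) := by
  rw [List.take_set, List.sum_set]
  by_cases h : n < m
  · have hlen : n < (List.take m d).length := by simp; omega
    have h2 : (List.take n (List.take m d)).sum + (List.drop n (List.take m d)).sum = (List.take m d).sum := by
      rw [← List.sum_append, List.take_append_drop]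
    have h4 : (List.take m d)[n] = d[n] := List.getElem_take
    have h7 : (List.drop n (List.take m d)).sum = d[n] + (List.drop (n + 1) (List.take m d)).sum := by
      rw [List.drop_eq_getElem_cons hlen, List.sum_cons, h4]
    rw [if_pos hlen, if_pos h]
    omega
  · have hlen : ¬ n < (List.take m d).length := by simp; omega
    have h5 : (List.take n (List.take m d)) = List.take m d := List.take_of_length_le (by omega)
    have h6 : (List.drop (n + 1) (List.take m d)) = [] := List.drop_eq_nil_of_le (by omega)
    rw [if_neg hlen, if_neg h, h5, h6]
    simp

lemma sum_take_pvBump (d : List Int) (i v : Int) (h0 : 0 ≤ i) (hi : i < (d.length : Int)) (m : Nat) :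
    ((pvBump d i v).take m).sum = (d.take m).sum + (if i < (m : Int) then v else 0) := by
  have hi' : i.toNat < d.length := by omega
  rw [pvBump, PySem.List.pySetD_of_nonneg _ _ h0, PySem.List.pyGetD_eq_getElem _ _ h0 hi,
    sum_take_set_int d i.toNat _ hi' m]
  by_cases h : i.toNat < m
  · rw [if_pos h, if_pos (by omega)]; ring
  · rw [if_neg h, if_neg (by omega)]

lemma sum_take_foldl_pvBumpStep (Q : List (Int × Int)) : ∀ (d : List Int),
    (∀ q ∈ Q, q.1 < q.2 → 0 ≤ q.1 ∧ q.2 < (d.length : Int)) → ∀ k : Nat,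
    ((Q.foldl pvBumpStep d).take (k + 1)).sum =
      (d.take (k + 1)).sum +
        (Q.countP (fun q => decide (q.1 ≤ (k : Int) ∧ (k : Int) < q.2)) : Int) := by
  induction Q with
  | nil => intro d _ k; simp
  | cons q Q ih =>
    intro d hq k
    simp only [List.foldl_cons]
    rw [ih (pvBumpStep d q) (by
      intro p hp
      rw [length_pvBumpStep]
      exact hq p (List.mem_cons_of_mem _ hp)) k]
    rw [List.countP_cons]
    have hq0 := hq q (List.mem_cons_self ..)
    by_cases hlt : q.1 < q.2
    · obtain ⟨h1, h2⟩ := hq0 hlt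
      have e1 : (pvBumpStep d q) = pvBump (pvBump d q.1 1) q.2 (-1) := by
        unfold pvBumpStep; rw [if_pos hlt]
      rw [e1, sum_take_pvBump _ _ _ (by omega) (by rw [length_pvBump]; omega),
        sum_take_pvBump _ _ _ h1 (by omega)]
      push_cast
      simp only [decide_eq_true_eq]
      by_cases hc : q.1 ≤ (k : Int) ∧ (k : Int) < q.2
      · rw [if_pos hc, if_pos (by omega : q.1 < (k : Int) + 1), if_neg (by omega : ¬ q.2 < (k : Int) + 1)]
        ring
      · rw [if_neg hc]
        by_cases hck : q.1 ≤ (k : Int)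
        · rw [if_pos (by omega : q.1 < (k : Int) + 1), if_pos (by omega : q.2 < (k : Int) + 1)]
          ring
        · rw [if_neg (by omega : ¬ q.1 < (k : Int) + 1), if_neg (by omega : ¬ q.2 < (k : Int) + 1)]
          ring
    · have e1 : (pvBumpStep d q) = d := by unfold pvBumpStep; rw [if_neg hlt]
      have hnc : ¬ (q.1 ≤ (k : Int) ∧ (k : Int) < q.2) := by omega
      rw [e1]
      simp only [decide_eq_true_eq, if_neg hnc]
      push_cast
      ring

lemma scan_range (h : Nat → Int) : ∀ (n : Nat) (l0 : List Int) (c0 : Int),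
    (List.range n).foldl (fun (st : List Int × Int) k =>
        (st.1 ++ [if 0 < st.2 + h k then (1 : Int) else 0], st.2 + h k)) (l0, c0)
    = (l0 ++ (List.range n).map (fun k =>
          if 0 < c0 + ((List.range (k + 1)).map h).sum then (1 : Int) else 0),
       c0 + ((List.range n).map h).sum) := by
  intro n
  induction n with
  | zero => intro l0 c0; simp
  | succ n ih =>
    intro l0 c0
    rw [List.range_succ, List.foldl_append, ih]
    simp only [List.foldl_cons, List.foldl_nil, List.map_append, List.map_cons, List.map_nil,
      List.sum_append, List.sum_cons, List.sum_nil, List.append_assoc]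
    rw [show (List.range (n + 1)) = List.range n ++ [n] from List.range_succ]
    simp [List.sum_append, add_assoc]

lemma sum_map_range_getD (d : List Int) : ∀ (m : Nat), m ≤ d.length →
    ((List.range m).map (fun k => PySem.List.pyGetD d ((k : Nat) : Int) 0)).sum
      = (d.take m).sum := by
  intro m
  induction m with
  | zero => intro _; simp
  | succ m ih =>
    intro hm
    have hml : m < d.length := by omega
    rw [List.range_succ, List.map_append, List.sum_append, ih (by omega), List.take_add_one]
    simp only [List.map_cons, List.map_nil, List.sum_cons, List.sum_nil, List.sum_append]
    rw [PySem.List.pyGetD_eq_getElem d 0 (by omega) (by exact_mod_cast hml)]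
    simp [List.getElem?_eq_getElem hml]

lemma offsets_fold (L : List Int) : ∀ (acc : List Int) (hacc : acc ≠ []),
    L.foldl (fun acc l => acc ++ [PySem.List.pyGetD acc (-1) 0 + l]) acc
    = acc ++ (List.range L.length).map (fun j => acc.getLast hacc + (L.take (j + 1)).sum) := by
  induction L with
  | nil => intro acc hacc; simp
  | cons l L ih =>
    intro acc hacc
    simp only [List.foldl_cons]
    rw [PySem.List.pyGetD_neg_one acc 0 hacc]
    rw [ih (acc ++ [acc.getLast hacc + l]) (by simp)]
    rw [List.append_assoc]
    congr 1
    have hlast : (acc ++ [acc.getLast hacc + l]).getLast (by simp) = acc.getLast hacc + l := by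
      simp
    rw [List.length_cons, List.range_succ_eq_map, List.map_cons, List.map_map]
    simp only [hlast]
    simp [Function.comp_def, add_assoc]

lemma pvOff_zero (S : List (List String)) : pvOff S 0 = 0 := by simp [pvOff]

lemma pvOff_nonneg (S : List (List String)) (j : Nat) : 0 ≤ pvOff S j := by
  apply List.sum_nonneg
  intro x hx
  simp only [List.mem_map] at hx
  obtain ⟨a, _, rfl⟩ := hx
  positivity

lemma pvOff_succ (S : List (List String)) (j : Nat) (h : j < S.length) :
    pvOff S (j + 1) = pvOff S j + ((S[j].length : Nat) : Int) := by
  unfold pvOff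
  rw [List.take_add_one, List.map_append, List.sum_append]
  simp [List.getElem?_eq_getElem h]

lemma offsets_getD (S : List (List String)) (idx : Nat) (h : idx < max 1 S.length) :
    PySem.List.pyGetD (((S.map (fun s => (s.length : Int))).dropLast).foldl
        (fun acc l => acc ++ [PySem.List.pyGetD acc (-1) 0 + l]) [(0 : Int)]) ((idx : Nat) : Int) 0
      = pvOff S idx := by
  rw [offsets_fold _ [(0 : Int)] (by simp), PySem.List.pyGetD_natCast]
  rcases idx with _ | j
  · simp [pvOff]
  · have hS : j + 1 < S.length := by omega
    have hlen : (S.map (fun s => (s.length : Int))).dropLast.length = S.length - 1 := by simp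
    rw [List.getD_eq_getElem?_getD]
    have hj : j < (S.map (fun s => (s.length : Int))).dropLast.length := by omega
    rw [List.singleton_append, List.getElem?_cons_succ, List.getElem?_map,
      List.getElem?_eq_getElem (by simpa using hj)]
    simp only [List.getLast_singleton, Option.map_some, Option.getD_some, List.getElem_range]
    rw [List.dropLast_eq_take, List.take_take, min_eq_left (by simp; omega)]
    unfold pvOff
    rw [List.map_take]
    omega

lemma pvFlatQ_bounds (off : Nat → Int) (T : Int) :
    ∀ (N : List (List (Int × Int × String))) (j : Nat),
      (∀ i : Nat, ∀ _h : i < N.length, ∀ sp ∈ N[i],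
          0 ≤ off (j + i) + sp.1 ∨ min (off (j + i) + sp.2.1 + 1) T ≤ off (j + i) + sp.1) →
      ∀ q ∈ pvFlatQ off T N j, (q.1 < q.2 → 0 ≤ q.1) ∧ q.2 ≤ T := by
  intro N
  induction N with
  | nil => intro j _ q hq; simp [pvFlatQ] at hq
  | cons n N ih =>
    intro j hsp q hq
    rw [pvFlatQ] at hq
    rcases List.mem_append.mp hq with hq | hq
    · simp only [List.mem_map] at hq
      obtain ⟨sp, hsp', rfl⟩ := hq
      have h1 := hsp 0 (by simp) sp (by simpa using hsp')
      rw [Nat.add_zero] at h1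
      exact ⟨fun hlt => by simp only [] at hlt ⊢; omega, min_le_right _ _⟩
    · exact ih (j + 1) (by
        intro i hi sp hmem
        have := hsp (i + 1) (by simpa using hi) sp (by simpa using hmem)
        have hz : j + (i + 1) = j + 1 + i := by omega
        rw [hz] at this
        exact this) q hq

lemma A_flat (offsets : List Int) (T : Int) (S : List (List String)) :
    ∀ (N : List (List (Int × Int × String))) (j : Nat) (lab : List Int),
      (∀ i : Nat, i < N.length → PySem.List.pyGetD offsets ((j : Int) + (i : Int)) 0 = pvOff S (j + i)) →
      (PySem.List.enumerate N (j : Int)).foldl (fun lab p =>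
          p.2.foldl (fun lab sp =>
            if PySem.List.pyGetD offsets p.1 0 + sp.1 < T then
              (PySem.List.pyRange (PySem.List.pyGetD offsets p.1 0 + sp.1)
                (min (PySem.List.pyGetD offsets p.1 0 + sp.2.1 + 1) T)).foldl
                (fun lab i => PySem.List.pySetD lab i 1) lab
            else lab) lab) lab
      = (pvFlatQ (pvOff S) T N j).foldl pvMark lab := by
  intro N
  induction N with
  | nil => intro j lab _; simp [pvFlatQ, PySem.List.enumerate]
  | cons n N ih =>
    intro j lab hoff
    rw [PySem.List.enumerate_cons]
    simp only [List.foldl_cons]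
    have h0 : PySem.List.pyGetD offsets ((j : Nat) : Int) 0 = pvOff S j := by
      have := hoff 0 (by simp)
      simpa using this
    have hfun : (fun (lab : List Int) (sp : Int × Int × String) =>
        if PySem.List.pyGetD offsets ((j : Int), n).1 0 + sp.1 < T then
          (PySem.List.pyRange (PySem.List.pyGetD offsets ((j : Int), n).1 0 + sp.1)
            (min (PySem.List.pyGetD offsets ((j : Int), n).1 0 + sp.2.1 + 1) T)).foldl
            (fun lab i => PySem.List.pySetD lab i 1) lab
        else lab)
        = (fun (lab : List Int) (sp : Int × Int × String) =>
            pvMark lab (pvOff S j + sp.1, min (pvOff S j + sp.2.1 + 1) T)) := by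
      funext lab sp
      simp only [h0]
      by_cases hg : pvOff S j + sp.1 < T
      · rw [if_pos hg]; rfl
      · rw [if_neg hg]
        rw [pvMark]
        rw [PySem.List.pyRange_one_eq_nil (by omega : min (pvOff S j + sp.2.1 + 1) T ≤ pvOff S j + sp.1)]
        rfl
    rw [hfun]
    rw [show (n.foldl (fun (lab : List Int) (sp : Int × Int × String) =>
          pvMark lab (pvOff S j + sp.1, min (pvOff S j + sp.2.1 + 1) T)) lab)
        = ((n.map (fun sp : Int × Int × String =>
            (pvOff S j + sp.1, min (pvOff S j + sp.2.1 + 1) T))).foldl pvMark lab)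
      from (List.foldl_map).symm]
    rw [pvFlatQ, List.foldl_append]
    have hcast : ((j : Int) + 1) = (((j + 1 : Nat) : Nat) : Int) := by push_cast; ring
    rw [hcast, ih (j + 1) _ (by
      intro i hi
      have := hoff (i + 1) (by simp; omega)
      push_cast at this ⊢
      convert this using 2 <;> omega)]

lemma B_flat (S0 : List (List String)) (T : Int) :
    ∀ (N : List (List (Int × Int × String))) (j : Nat) (d : List Int),
      N.length + j ≤ S0.length →
      (((S0.drop j).zip N).foldl (fun (st : List Int × Int) pr =>
          (pr.2.foldl (fun dd sp =>
              if st.2 + sp.1 < min (st.2 + sp.2.1 + 1) T then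
                pvBump (pvBump dd (st.2 + sp.1) 1) (min (st.2 + sp.2.1 + 1) T) (-1)
              else dd) st.1,
           st.2 + ((pr.1.length : Nat) : Int))) (d, pvOff S0 j)).1
      = (pvFlatQ (pvOff S0) T N j).foldl pvBumpStep d := by
  intro N
  induction N with
  | nil => intro j d _; simp [pvFlatQ, List.zip_nil_right]
  | cons n N ih =>
    intro j d hlen
    have hj : j < S0.length := by simp at hlen; omega
    rw [List.drop_eq_getElem_cons hj, List.zip_cons_cons]
    simp only [List.foldl_cons]
    have hfun : (fun (dd : List Int) (sp : Int × Int × String) =>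
          if pvOff S0 j + sp.1 < min (pvOff S0 j + sp.2.1 + 1) T then
            pvBump (pvBump dd (pvOff S0 j + sp.1) 1) (min (pvOff S0 j + sp.2.1 + 1) T) (-1)
          else dd)
        = (fun (dd : List Int) (sp : Int × Int × String) =>
            pvBumpStep dd (pvOff S0 j + sp.1, min (pvOff S0 j + sp.2.1 + 1) T)) := rfl
    rw [hfun]
    rw [show (n.foldl (fun (dd : List Int) (sp : Int × Int × String) =>
          pvBumpStep dd (pvOff S0 j + sp.1, min (pvOff S0 j + sp.2.1 + 1) T)) d)
        = ((n.map (fun sp : Int × Int × String =>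
            (pvOff S0 j + sp.1, min (pvOff S0 j + sp.2.1 + 1) T))).foldl pvBumpStep d)
      from (List.foldl_map).symm]
    rw [pvFlatQ, List.foldl_append]
    rw [show pvOff S0 j + ((S0[j].length : Nat) : Int) = pvOff S0 (j + 1) from (pvOff_succ S0 j hj).symm]
    exact ih (j + 1) _ (by simp at hlen; omega)

lemma pvOff_full (S : List (List String)) :
    pvOff S S.length = (S.map (fun s => (s.length : Int))).sum := by
  simp [pvOff]

lemma flat_len : ∀ (S : List (List String)) (acc : List String),
    (((S.foldl (fun acc s => acc ++ s) acc).length : Nat) : Int)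
      = (acc.length : Int) + (S.map (fun s => (s.length : Int))).sum := by
  intro S
  induction S with
  | nil => intro acc; simp
  | cons s S ih =>
    intro acc
    simp only [List.foldl_cons, List.map_cons, List.sum_cons]
    rw [ih (acc ++ s)]
    simp only [List.length_append]
    push_cast
    ring

lemma length_mark_fold (c T : Int) (sps : List (Int × Int × String)) : ∀ (lab : List Int),
    (sps.foldl (fun lab sp =>
        if c + sp.1 < T then
          (PySem.List.pyRange (c + sp.1) (min (c + sp.2.1 + 1) T)).foldl
            (fun lab i => PySem.List.pySetD lab i 1) lab
        else lab) lab).length = lab.length := by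
  induction sps with
  | nil => intro lab; rfl
  | cons sp sps ih =>
    intro lab
    simp only [List.foldl_cons]
    rw [ih]
    split_ifs
    · rw [length_foldl_pySetD]
    · rfl

lemma length_A_fold (offsets : List Int) (T : Int) :
    ∀ (E : List (Int × List (Int × Int × String))) (lab : List Int),
      (E.foldl (fun lab p =>
          p.2.foldl (fun lab sp =>
            if PySem.List.pyGetD offsets p.1 0 + sp.1 < T then
              (PySem.List.pyRange (PySem.List.pyGetD offsets p.1 0 + sp.1)
                (min (PySem.List.pyGetD offsets p.1 0 + sp.2.1 + 1) T)).foldl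
                (fun lab i => PySem.List.pySetD lab i 1) lab
            else lab) lab) lab).length = lab.length := by
  intro E
  induction E with
  | nil => intro lab; rfl
  | cons p E ih =>
    intro lab
    simp only [List.foldl_cons]
    rw [ih, length_mark_fold]

-- ===== VERDICT (by name: the statement is the Claim_ definition above) =====
theorem generate_token_labels_spec : Claim_equal_generate_token_labels := by
  intro S N _ hpre
  obtain ⟨hlen, hsp⟩ := hpre
  unfold Spec_generate_token_labels
  simp only [generate_token_labels, generate_token_labels_alt]
  by_cases hNS : N.length ≤ S.length
  case neg =>
    -- then S = [] and the single span list can touch nothing (total_len = 0)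
    have hS : S = [] := by
      rcases S with _ | ⟨s, S'⟩
      · rfl
      · exfalso; simp at hlen hNS; omega
    subst hS
    simp only [List.foldl_nil, List.map_nil, List.sum_nil, List.length_nil, Nat.cast_zero,
      Int.toNat_zero, List.replicate_zero, List.zip_nil_left]
    rw [PySem.List.pyRange_one_eq_nil (le_refl 0)]
    refine Prod.ext ?_ rfl
    apply List.eq_nil_of_length_eq_zero
    rw [length_A_fold]
    rfl
  case pos =>
    have hT : (((List.foldl (fun acc sent => acc ++ sent) [] S).length : Nat) : Int)
        = (List.map (fun s => (s.length : Int)) S).sum := by simpa using flat_len S []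
    rw [hT]
    set T := (List.map (fun s => (s.length : Int)) S).sum with hTdef
    have hT0 : 0 ≤ T := by rw [hTdef, ← pvOff_full]; exact pvOff_nonneg S S.length
    have hA := A_flat (((S.map (fun s => (s.length : Int))).dropLast).foldl
        (fun acc l => acc ++ [PySem.List.pyGetD acc (-1) 0 + l]) [(0 : Int)]) T S N 0
        (List.replicate T.toNat 0) (by
          intro i hi
          have h := offsets_getD S i (by omega)
          simpa using h)
    simp only [Nat.cast_zero] at hA
    rw [hA]
    have hB := B_flat S T N 0 (List.replicate (T.toNat + 1) 0) (by omega)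
    simp only [List.drop_zero, pvOff_zero] at hB
    rw [hB]
    set Q := pvFlatQ (pvOff S) T N 0 with hQdef
    set D := List.foldl pvBumpStep (List.replicate (T.toNat + 1) 0) Q with hDdef
    refine Prod.ext ?_ rfl
    rw [PySem.List.pyRange_one 0 T]
    simp only [List.foldl_map, zero_add, sub_zero]
    rw [scan_range (fun k => PySem.List.pyGetD D ((k : Nat) : Int) 0) T.toNat [] 0]
    dsimp only
    simp only [List.nil_append, zero_add]
    have hQb : ∀ q ∈ Q, (q.1 < q.2 → 0 ≤ q.1) ∧ q.2 ≤ T :=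
      pvFlatQ_bounds (pvOff S) T N 0 (by
        intro i hi sp hmem
        have := hsp i hi sp hmem
        simpa using this)
    have hDlen : D.length = T.toNat + 1 := by
      rw [hDdef, length_foldl_pvBumpStep]; simp
    apply List.ext_getElem?
    intro k
    rw [foldl_pvMark_getElem Q (List.replicate T.toNat 0) (by
      intro q hq
      have h := hQb q hq
      refine ⟨h.1, ?_⟩
      simp only [List.length_replicate]
      omega) k]
    rw [List.getElem?_map]
    by_cases hk : k < T.toNat
    · rw [List.getElem?_range hk, Option.map_some]
      have hsum : ((List.range (k + 1)).map (fun k => PySem.List.pyGetD D ((k : Nat) : Int) 0)).sum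
          = ((Q.countP (fun q => decide (q.1 ≤ (k : Int) ∧ (k : Int) < q.2)) : Nat) : Int) := by
        rw [sum_map_range_getD D (k + 1) (by omega), hDdef,
          sum_take_foldl_pvBumpStep Q _ (by
            intro q hq hlt
            have h := hQb q hq
            refine ⟨h.1 hlt, ?_⟩
            simp only [List.length_replicate]
            push_cast
            omega) k]
        simp [List.take_replicate]
      rw [hsum]
      rw [List.getElem?_replicate, if_pos hk]
      by_cases hex : ∃ q ∈ Q, q.1 ≤ (k : Int) ∧ (k : Int) < q.2
      · have hc : 0 < Q.countP (fun q => decide (q.1 ≤ (k : Int) ∧ (k : Int) < q.2)) := by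
          rcases hex with ⟨q, hq, h⟩
          exact List.countP_pos_iff.mpr ⟨q, hq, by simpa using h⟩
        rw [if_pos hex, if_pos (by exact_mod_cast hc)]
      · have hc : Q.countP (fun q => decide (q.1 ≤ (k : Int) ∧ (k : Int) < q.2)) = 0 := by
          rw [List.countP_eq_zero]
          intro q hq
          simp only [decide_eq_true_eq]
          intro h
          exact hex ⟨q, hq, h⟩
        rw [if_neg hex, if_neg (by rw [hc]; simp)]
    · have hnone : (List.range T.toNat)[k]? = none := by
        rw [List.getElem?_eq_none_iff]
        simpa using hk
      rw [hnone, Option.map_none]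
      rw [if_neg (by
        rintro ⟨q, hq, h⟩
        have h2 := (hQb q hq).2
        omega)]
      rw [List.getElem?_replicate, if_neg hk]
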